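-- pv_equiv track=rewrite | github.com/praj33/Law-Agent-by-Grok | improved_response_formatter.py | _get_enhanced_subcategory
-- ===== SOURCE A (Python) =====
-- def _get_enhanced_subcategory(domain: str, query: str) -> str:
--     """Get enhanced subcategory based on domain and query"""
--     query_lower = query.lower()
--
--     subcategories = {
--         'corporate_law': 'confidentiality_breach / trade_secrets' if any(term in query_lower for term in ['confidential', 'secrets', 'disclosure']) else 'corporate_governance',
--         'employment_law': 'workplace_confidentiality / employee_duties' if any(term in query_lower for term in ['confidential', 'secrets', 'disclosure']) else 'workplace_rights',
--         'cyber_crime': 'data_breach / hacking' if any(term in query_lower for term in ['hack', 'breach', 'data']) else 'cyber_security',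
--         'tenant_rights': 'rental_disputes / deposit_issues',
--         'family_law': 'marriage / divorce / custody',
--         'criminal_law': 'offenses / legal_proceedings',
--         'consumer_complaint': 'product_defects / service_disputes'
--     }
--     return subcategories.get(domain, 'general_legal_matter')
-- ===== SOURCE B (Python) =====
-- # B: a flat first-match rule table scanned once by a single generic loop.
-- # Each rule is (domain, keyword-or-None, label); a rule fires when the domain
-- # matches and the keyword (if any) occurs in the lowered query.  Correct
-- # because for each domain the keyword rules precede the catch-all rule and all
-- # keyword rules of a domain carry the same label A would pick.
-- _RULES = [
--     ('corporate_law', 'confidential', 'confidentiality_breach / trade_secrets'),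
--     ('corporate_law', 'secrets', 'confidentiality_breach / trade_secrets'),
--     ('corporate_law', 'disclosure', 'confidentiality_breach / trade_secrets'),
--     ('corporate_law', None, 'corporate_governance'),
--     ('employment_law', 'confidential', 'workplace_confidentiality / employee_duties'),
--     ('employment_law', 'secrets', 'workplace_confidentiality / employee_duties'),
--     ('employment_law', 'disclosure', 'workplace_confidentiality / employee_duties'),
--     ('employment_law', None, 'workplace_rights'),
--     ('cyber_crime', 'hack', 'data_breach / hacking'),
--     ('cyber_crime', 'breach', 'data_breach / hacking'),
--     ('cyber_crime', 'data', 'data_breach / hacking'),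
--     ('cyber_crime', None, 'cyber_security'),
--     ('tenant_rights', None, 'rental_disputes / deposit_issues'),
--     ('family_law', None, 'marriage / divorce / custody'),
--     ('criminal_law', None, 'offenses / legal_proceedings'),
--     ('consumer_complaint', None, 'product_defects / service_disputes'),
-- ]
--
--
-- def _get_enhanced_subcategory(domain: str, query: str) -> str:
--     """Return the label of the first matching rule, else the default."""
--     query_lower = query.lower()
--     for dom, keyword, label in _RULES:
--         if dom == domain and (keyword is None or keyword in query_lower):
--             return label
--     return 'general_legal_matter'
-- ===== Notes on version B (the rewrite author's own statement) =====
-- stated objective: alternative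
-- what changed: B replaces A's per-domain dict of eagerly computed conditional labels with a flat first-match rule engine: one generic loop over (domain, keyword, label) rules that returns the label of the first rule whose domain matches and whose keyword (if any) occurs in the lowered query.
import Mathlib
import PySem

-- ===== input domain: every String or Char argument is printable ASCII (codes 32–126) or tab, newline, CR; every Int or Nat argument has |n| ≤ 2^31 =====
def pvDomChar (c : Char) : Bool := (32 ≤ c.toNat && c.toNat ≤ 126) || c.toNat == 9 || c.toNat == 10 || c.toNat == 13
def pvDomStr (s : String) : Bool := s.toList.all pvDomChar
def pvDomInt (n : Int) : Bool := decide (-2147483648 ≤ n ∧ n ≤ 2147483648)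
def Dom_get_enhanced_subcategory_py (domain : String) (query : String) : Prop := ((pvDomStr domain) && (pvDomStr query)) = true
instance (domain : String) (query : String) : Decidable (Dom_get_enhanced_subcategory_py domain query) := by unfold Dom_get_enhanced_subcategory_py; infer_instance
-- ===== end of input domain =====

-- B replaces A's dict of eagerly computed conditional labels with a flat first-match
-- (domain, keyword?, label) rule table scanned by one generic loop (objective: alternative).

-- ===== PORT A =====
def get_enhanced_subcategory_py (domain : String) (query : String) : String :=
  let query_lower := PySem.Str.lower query
  let subcategories : PySem.Dict String String := PySem.Dict.ofList
    [ ("corporate_law",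
        if ["confidential", "secrets", "disclosure"].any (fun term => PySem.Str.isIn term query_lower)
        then "confidentiality_breach / trade_secrets" else "corporate_governance"),
      ("employment_law",
        if ["confidential", "secrets", "disclosure"].any (fun term => PySem.Str.isIn term query_lower)
        then "workplace_confidentiality / employee_duties" else "workplace_rights"),
      ("cyber_crime",
        if ["hack", "breach", "data"].any (fun term => PySem.Str.isIn term query_lower)
        then "data_breach / hacking" else "cyber_security"),
      ("tenant_rights", "rental_disputes / deposit_issues"),
      ("family_law", "marriage / divorce / custody"),
      ("criminal_law", "offenses / legal_proceedings"),
      ("consumer_complaint", "product_defects / service_disputes") ]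
  subcategories.getD domain "general_legal_matter"

-- ===== PORT B =====
-- The flat rule table of Source B: (domain, keyword-or-None, label), in order.
def pvRules : List (String × Option String × String) :=
  [ ("corporate_law", some "confidential", "confidentiality_breach / trade_secrets"),
    ("corporate_law", some "secrets", "confidentiality_breach / trade_secrets"),
    ("corporate_law", some "disclosure", "confidentiality_breach / trade_secrets"),
    ("corporate_law", none, "corporate_governance"),
    ("employment_law", some "confidential", "workplace_confidentiality / employee_duties"),
    ("employment_law", some "secrets", "workplace_confidentiality / employee_duties"),
    ("employment_law", some "disclosure", "workplace_confidentiality / employee_duties"),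
    ("employment_law", none, "workplace_rights"),
    ("cyber_crime", some "hack", "data_breach / hacking"),
    ("cyber_crime", some "breach", "data_breach / hacking"),
    ("cyber_crime", some "data", "data_breach / hacking"),
    ("cyber_crime", none, "cyber_security"),
    ("tenant_rights", none, "rental_disputes / deposit_issues"),
    ("family_law", none, "marriage / divorce / custody"),
    ("criminal_law", none, "offenses / legal_proceedings"),
    ("consumer_complaint", none, "product_defects / service_disputes") ]

-- The generic loop of Source B: return the first matching rule's label, else the default.
def pvScan (domain : String) (query_lower : String) : List (String × Option String × String) → String
  | [] => "general_legal_matter"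
  | (dom, keyword, label) :: rest =>
    if dom == domain && (match keyword with
                         | none => true
                         | some k => PySem.Str.isIn k query_lower)
    then label else pvScan domain query_lower rest

def get_enhanced_subcategory_py_alt (domain : String) (query : String) : String :=
  pvScan domain (PySem.Str.lower query) pvRules

-- ===== PRECONDITION & SPEC =====
def Spec_get_enhanced_subcategory_py (domain : String) (query : String) (out : String) : Prop := out = get_enhanced_subcategory_py_alt domain query
instance (domain : String) (query : String) (out : String) : Decidable (Spec_get_enhanced_subcategory_py domain query out) := by unfold Spec_get_enhanced_subcategory_py; infer_instance

-- ===== CLAIM (what is proved, stated in full; the proofs are below) =====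
def Claim_equal_get_enhanced_subcategory_py : Prop := ∀ (domain : String) (query : String), Dom_get_enhanced_subcategory_py domain query → Spec_get_enhanced_subcategory_py domain query (get_enhanced_subcategory_py domain query)

-- ===== LEMMAS AND PROOFS =====

-- The literal table (values generic) is the literal association list.
theorem pvTableMk (v1 v2 v3 : String) :
    (PySem.Dict.ofList [("corporate_law", v1), ("employment_law", v2), ("cyber_crime", v3),
      ("tenant_rights", "rental_disputes / deposit_issues"),
      ("family_law", "marriage / divorce / custody"),
      ("criminal_law", "offenses / legal_proceedings"),
      ("consumer_complaint", "product_defects / service_disputes")] : PySem.Dict String String) = PySem.Dict.mk [("corporate_law", v1), ("employment_law", v2), ("cyber_crime", v3),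
      ("tenant_rights", "rental_disputes / deposit_issues"),
      ("family_law", "marriage / divorce / custody"),
      ("criminal_law", "offenses / legal_proceedings"),
      ("consumer_complaint", "product_defects / service_disputes")] := rfl

-- The table's lookup misses every key other than the seven literals (values generic).
theorem pvTableNone (v1 v2 v3 : String) (k : String)
    (h1 : k ≠ "corporate_law") (h2 : k ≠ "employment_law") (h3 : k ≠ "cyber_crime")
    (h4 : k ≠ "tenant_rights") (h5 : k ≠ "family_law") (h6 : k ≠ "criminal_law")
    (h7 : k ≠ "consumer_complaint") :
    (PySem.Dict.ofList [("corporate_law", v1), ("employment_law", v2), ("cyber_crime", v3),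
      ("tenant_rights", "rental_disputes / deposit_issues"),
      ("family_law", "marriage / divorce / custody"),
      ("criminal_law", "offenses / legal_proceedings"),
      ("consumer_complaint", "product_defects / service_disputes")] :
      PySem.Dict String String).get? k = none := by
  rw [pvTableMk]
  simp [PySem.Dict.get?_mk_cons, beq_iff_eq, h1.symm, h2.symm, h3.symm, h4.symm, h5.symm, h6.symm, h7.symm]
  rfl

-- ===== VERDICT (by name: the statement is the Claim_ definition above) =====
theorem get_enhanced_subcategory_py_spec : Claim_equal_get_enhanced_subcategory_py := by
  intro domain query _
  unfold Spec_get_enhanced_subcategory_py get_enhanced_subcategory_py get_enhanced_subcategory_py_alt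
  by_cases h1 : domain = "corporate_law"
  · subst h1
    rw [PySem.Dict.getD_eq_get?_getD, pvTableMk]
    simp only [pvRules, pvScan, PySem.Dict.get?_mk_cons, List.any_cons, List.any_nil, beq_self_eq_true]
    rcases Bool.dichotomy (PySem.Str.isIn "confidential" (PySem.Str.lower query)) with ha | ha <;>
    rcases Bool.dichotomy (PySem.Str.isIn "secrets" (PySem.Str.lower query)) with hb | hb <;>
    rcases Bool.dichotomy (PySem.Str.isIn "disclosure" (PySem.Str.lower query)) with hc | hc <;>
      (simp [PySem.Str.isIn, PySem.Str.lower, String.toList_ofList] at ha hb hc; simp [ha, hb, hc])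
  by_cases h2 : domain = "employment_law"
  · subst h2
    rw [PySem.Dict.getD_eq_get?_getD, pvTableMk]
    simp only [pvRules, pvScan, PySem.Dict.get?_mk_cons, List.any_cons, List.any_nil, beq_self_eq_true]
    rcases Bool.dichotomy (PySem.Str.isIn "confidential" (PySem.Str.lower query)) with ha | ha <;>
    rcases Bool.dichotomy (PySem.Str.isIn "secrets" (PySem.Str.lower query)) with hb | hb <;>
    rcases Bool.dichotomy (PySem.Str.isIn "disclosure" (PySem.Str.lower query)) with hc | hc <;>
      (simp [PySem.Str.isIn, PySem.Str.lower, String.toList_ofList] at ha hb hc; simp [ha, hb, hc])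
  by_cases h3 : domain = "cyber_crime"
  · subst h3
    rw [PySem.Dict.getD_eq_get?_getD, pvTableMk]
    simp only [pvRules, pvScan, PySem.Dict.get?_mk_cons, List.any_cons, List.any_nil, beq_self_eq_true]
    rcases Bool.dichotomy (PySem.Str.isIn "hack" (PySem.Str.lower query)) with ha | ha <;>
    rcases Bool.dichotomy (PySem.Str.isIn "breach" (PySem.Str.lower query)) with hb | hb <;>
    rcases Bool.dichotomy (PySem.Str.isIn "data" (PySem.Str.lower query)) with hc | hc <;>
      (simp [PySem.Str.isIn, PySem.Str.lower, String.toList_ofList] at ha hb hc; simp [ha, hb, hc])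
  by_cases h4 : domain = "tenant_rights"
  · subst h4
    rw [PySem.Dict.getD_eq_get?_getD, pvTableMk]
    simp [PySem.Dict.get?_mk_cons, pvRules, pvScan]
  by_cases h5 : domain = "family_law"
  · subst h5
    rw [PySem.Dict.getD_eq_get?_getD, pvTableMk]
    simp [PySem.Dict.get?_mk_cons, pvRules, pvScan]
  by_cases h6 : domain = "criminal_law"
  · subst h6
    rw [PySem.Dict.getD_eq_get?_getD, pvTableMk]
    simp [PySem.Dict.get?_mk_cons, pvRules, pvScan]
  by_cases h7 : domain = "consumer_complaint"
  · subst h7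
    rw [PySem.Dict.getD_eq_get?_getD, pvTableMk]
    simp [PySem.Dict.get?_mk_cons, pvRules, pvScan]
  · rw [PySem.Dict.getD_eq_get?_getD, pvTableNone _ _ _ domain h1 h2 h3 h4 h5 h6 h7]
    simp [pvRules, pvScan, beq_iff_eq, Ne.symm h1, Ne.symm h2, Ne.symm h3, Ne.symm h4, Ne.symm h5, Ne.symm h6, Ne.symm h7]
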